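-- pv_equiv track=rewrite | github.com/YukihiroHoshino/LLMagent_tasks | old/exp5_job_Boston_5v5/src/boston_engine.py | run_boston_algorithm
-- ===== SOURCE A (Python) =====
-- def run_boston_algorithm(seekers_prefs, companies_prefs):
--     """
--     Boston Mechanism (Immediate Acceptance).
--     Acceptances are final immediately.
--     """
--     # Initialize state
--     free_seekers = list(seekers_prefs.keys())
--     matches = {} # {Company: Seeker}
--
--     # Track which preference index each seeker is currently at
--     proposals_idx = {seeker: 0 for seeker in seekers_prefs}
--
--     # Companies that are already full
--     full_companies = set()
--
--     round_num = 0
--     while free_seekers: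
--         round_num += 1
--         # Round-based processing
--         current_round_proposals = {} # {Company: [List of Seekers applied this round]}
--
--         # 1. Proposal Phase
--         # Only free seekers propose
--         remaining_seekers = []
--         for seeker in free_seekers:
--             submitted_list = seekers_prefs.get(seeker, [])
--             idx = proposals_idx[seeker]
--
--             if idx >= len(submitted_list):
--                 continue # No more preferences
--
--             company = submitted_list[idx]
--
--             if company in full_companies:
--                 # If company is already full, this proposal is wasted (instant rejection)
--                 # In Boston, usually you apply, get rejected.
--                 # effectively we just increment index for next round
--                 proposals_idx[seeker] += 1
--                 remaining_seekers.append(seeker)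
--             else:
--                 if company not in current_round_proposals:
--                     current_round_proposals[company] = []
--                 current_round_proposals[company].append(seeker)
--                 # Increment index for next time (if rejected)
--                 proposals_idx[seeker] += 1
--
--         free_seekers = remaining_seekers # Seekers who applied to full companies are still free
--
--         # 2. Acceptance Phase
--         for company, applicants in current_round_proposals.items():
--             # Sort applicants based on company's true preference
--             c_pref = companies_prefs.get(company, [])
--
--             # Filter applicants who are actually in company's pref list
--             valid_applicants = [a for a in applicants if a in c_pref]
--
--             if not valid_applicants:
--                 # All applicants were unacceptable
--                 free_seekers.extend(applicants)
--                 continue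
--
--             # Find the best one
--             # Lower index in c_pref = better
--             best_applicant = min(valid_applicants, key=lambda x: c_pref.index(x))
--
--             # Match is FINAL
--             matches[company] = best_applicant
--             full_companies.add(company)
--
--             # Others are rejected
--             rejected = [a for a in applicants if a != best_applicant]
--             free_seekers.extend(rejected)
--
--         # Break if no one is free or no progress can be made
--         if not current_round_proposals and not free_seekers:
--             break
--
--     return matches
-- ===== SOURCE B (Python) =====
-- def run_boston_algorithm(seekers_prefs, companies_prefs):
--     """
--     Boston mechanism via a pool of seekers carrying their own remaining
--     preference suffixes: no per-seeker index dict and no separate full-company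
--     set (a company is full iff it is a key of matches).  Each round is two
--     staged passes over flat lists: pass 1 pops every pool member's head choice,
--     splitting into carried (head already matched) and a flat ordered proposal
--     list; pass 2 walks the proposals once per first-seen company, picking the
--     winner by scanning the company's own preference list.
--     """
--     matches = {}
--     pool = [(s, list(p)) for s, p in seekers_prefs.items()]
--     while pool:
--         carried = []
--         proposals = []  # flat ordered list of (company, seeker, remaining prefs)
--         for s, prefs in pool:
--             if not prefs:
--                 continue  # exhausted seekers drop out
--             if prefs[0] in matches:
--                 carried.append((s, prefs[1:]))
--             else:
--                 proposals.append((prefs[0], s, prefs[1:]))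
--         pool = carried
--         seen = set()
--         for c, _, _ in proposals:
--             if c in seen:
--                 continue
--             seen.add(c)
--             apps = [(s, rest) for c2, s, rest in proposals if c2 == c]
--             winner = next((x for x in companies_prefs.get(c, [])
--                            if any(s == x for s, _ in apps)), None)
--             if winner is None:
--                 pool += apps
--             else:
--                 matches[c] = winner
--                 pool += [p for p in apps if p[0] != winner]
--     return matches
-- ===== Notes on version B (the rewrite author's own statement) =====
-- stated objective: alternative
-- what changed: Replaces A's state machine (free-seeker list + per-seeker proposals_idx dict + separate full_companies set + per-round grouping dict with min-by-c_pref.index selection) by a pool of seekers each carrying its own remaining preference suffix: each round pops every suffix head into a flat ordered proposal list (fullness tested by key membership in matches itself), then a single first-occurrence walk over that flat list decides each company by scanning the company's own preference list for the first applicant.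
import Mathlib
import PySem

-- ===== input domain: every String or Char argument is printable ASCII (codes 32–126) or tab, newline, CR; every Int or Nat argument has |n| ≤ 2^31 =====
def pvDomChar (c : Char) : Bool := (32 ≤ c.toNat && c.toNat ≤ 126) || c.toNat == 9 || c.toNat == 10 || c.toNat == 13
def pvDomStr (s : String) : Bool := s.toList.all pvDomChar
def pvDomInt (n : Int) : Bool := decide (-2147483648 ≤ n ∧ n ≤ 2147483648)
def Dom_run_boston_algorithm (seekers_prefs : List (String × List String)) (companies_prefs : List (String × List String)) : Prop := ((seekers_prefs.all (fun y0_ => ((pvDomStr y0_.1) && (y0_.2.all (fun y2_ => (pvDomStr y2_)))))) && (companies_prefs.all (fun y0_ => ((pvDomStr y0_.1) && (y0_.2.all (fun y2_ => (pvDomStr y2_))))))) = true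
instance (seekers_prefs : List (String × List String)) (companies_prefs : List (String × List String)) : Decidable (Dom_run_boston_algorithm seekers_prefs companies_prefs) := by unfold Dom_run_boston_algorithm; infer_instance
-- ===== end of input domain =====

-- B replaces A's state machine (free list + proposals_idx dict + full_companies set + per-round
-- grouping dict with min-by-index selection) by a pool of seekers carrying their own remaining
-- preference suffixes and flat staged passes; same return value (objective: alternative).

-- ===== PORT A =====
-- one seeker's proposal step (body of A's "for seeker in free_seekers" loop);
-- state = (remaining_seekers, current_round_proposals, proposals_idx)
def bostonPropose (sp : PySem.Dict String (List String)) (full : PySem.Set String)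
    (st : List String × PySem.Dict String (List String) × PySem.Dict String Nat) (s : String) :
    List String × PySem.Dict String (List String) × PySem.Dict String Nat :=
  let prefs := sp.getD s []
  let idx := st.2.2.getD s 0
  if idx ≥ prefs.length then st
  else
    let c := prefs.getD idx ""
    if full.contains c then (st.1 ++ [s], st.2.1, st.2.2.insert s (idx + 1))
    else
      let props := if st.2.1.contains c then st.2.1 else st.2.1.insert c []
      (st.1, props.modify c [] (· ++ [s]), st.2.2.insert s (idx + 1))

-- one company's acceptance step (body of A's "for company, applicants in …" loop);
-- state = (ms, full_companies, free_seekers)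
def bostonAccept (cp : PySem.Dict String (List String))
    (st : PySem.Dict String String × PySem.Set String × List String) (item : String × List String) :
    PySem.Dict String String × PySem.Set String × List String :=
  let c_pref := cp.getD item.1 []
  let valid := item.2.filter (fun a => c_pref.contains a)
  match PySem.List.min? valid (fun x => (PySem.List.index? c_pref x).getD 0) with
  | none => (st.1, st.2.1, st.2.2 ++ item.2)
  | some best =>
      (st.1.insert item.1 best, st.2.1.add item.1, st.2.2 ++ item.2.filter (fun a => a != best))

-- A's while-loop, fueled (the loop runs at most maxlen+1 rounds: every still-free seeker's
-- index advances each round)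
def bostonLoopA (sp cp : PySem.Dict String (List String)) :
    Nat → List String → PySem.Dict String Nat → PySem.Dict String String → PySem.Set String →
    PySem.Dict String String
  | 0, _, _, ms, _ => ms
  | fuel + 1, free, pidx, ms, full =>
    if free.isEmpty then ms
    else
      let p := free.foldl (bostonPropose sp full) ([], PySem.Dict.empty, pidx)
      let a := p.2.1.items.foldl (bostonAccept cp) (ms, full, p.1)
      if p.2.1.items.isEmpty && a.2.2.isEmpty then a.1
      else bostonLoopA sp cp fuel a.2.2 p.2.2 a.1 a.2.1

def run_boston_algorithm (seekers_prefs : List (String × List String))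
    (companies_prefs : List (String × List String)) : List (String × String) :=
  let sp := PySem.Dict.ofList seekers_prefs
  let cp := PySem.Dict.ofList companies_prefs
  let free := sp.keys
  let pidx := free.foldl (fun d s => d.insert s 0) PySem.Dict.empty
  let maxlen := sp.values.foldl (fun m l => max m l.length) 0
  (bostonLoopA sp cp (maxlen + 1) free pidx PySem.Dict.empty PySem.Set.empty).items

-- ===== PORT B =====
-- pass 1 (body of B's "for s, prefs in pool" loop): pop the head choice;
-- state = (carried, proposals); a company is full iff it is a key of matches
def bostonPhase1 (ms : PySem.Dict String String)
    (st : List (String × List String) × List (String × String × List String))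
    (p : String × List String) :
    List (String × List String) × List (String × String × List String) :=
  match p.2 with
  | [] => st
  | c :: rest =>
      if ms.contains c then (st.1 ++ [(p.1, rest)], st.2)
      else (st.1, st.2 ++ [(c, p.1, rest)])

-- pass 2 (body of B's "for c, _, _ in proposals" loop): first-seen companies decide;
-- state = (seen, matches, pool)
def bostonPhase2 (cp : PySem.Dict String (List String))
    (proposals : List (String × String × List String))
    (st : PySem.Set String × PySem.Dict String String × List (String × List String))
    (q : String × String × List String) :
    PySem.Set String × PySem.Dict String String × List (String × List String) :=
  if st.1.contains q.1 then st
  else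
    let apps := (proposals.filter (fun r => r.1 == q.1)).map (fun r => (r.2.1, r.2.2))
    match (cp.getD q.1 []).find? (fun x => apps.any (fun a => a.1 == x)) with
    | none => (st.1.add q.1, st.2.1, st.2.2 ++ apps)
    | some w => (st.1.add q.1, st.2.1.insert q.1 w, st.2.2 ++ apps.filter (fun a => a.1 != w))

-- B's while-loop over the pool, fueled (each round every surviving suffix shortens by one)
def bostonLoopB (cp : PySem.Dict String (List String)) :
    Nat → List (String × List String) → PySem.Dict String String → PySem.Dict String String
  | 0, _, ms => ms
  | n + 1, pool, ms =>
    if pool.isEmpty then ms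
    else
      let p := pool.foldl (bostonPhase1 ms) ([], [])
      let r := p.2.foldl (bostonPhase2 cp p.2) (PySem.Set.empty, ms, p.1)
      bostonLoopB cp n r.2.2 r.2.1

def run_boston_algorithm_alt (seekers_prefs : List (String × List String))
    (companies_prefs : List (String × List String)) : List (String × String) :=
  let cp := PySem.Dict.ofList companies_prefs
  let pool := (PySem.Dict.ofList seekers_prefs).items
  let fuel := pool.foldl (fun m q => max m q.2.length) 0
  (bostonLoopB cp fuel pool PySem.Dict.empty).items

-- ===== PRECONDITION & SPEC =====
def Spec_run_boston_algorithm (seekers_prefs : List (String × List String)) (companies_prefs : List (String × List String)) (out : List (String × String)) : Prop := out = run_boston_algorithm_alt seekers_prefs companies_prefs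
instance (seekers_prefs : List (String × List String)) (companies_prefs : List (String × List String)) (out : List (String × String)) : Decidable (Spec_run_boston_algorithm seekers_prefs companies_prefs out) := by unfold Spec_run_boston_algorithm; infer_instance

-- ===== CLAIM (what is proved, stated in full; the proofs are below) =====
def Claim_equal_run_boston_algorithm : Prop := ∀ (seekers_prefs : List (String × List String)) (companies_prefs : List (String × List String)), Dom_run_boston_algorithm seekers_prefs companies_prefs → Spec_run_boston_algorithm seekers_prefs companies_prefs (run_boston_algorithm seekers_prefs companies_prefs)

-- ===== LEMMAS AND PROOFS =====

-- M: an intermediate rank-level formulation used only by the proof (free list of names,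
-- explicit full set, rank counter t); A's loop is proved equal to M, and M equal to B's loop.
def bostonGroup (sp : PySem.Dict String (List String)) (full : PySem.Set String) (t : Nat)
    (st : List String × PySem.Dict String (List String)) (s : String) :
    List String × PySem.Dict String (List String) :=
  let prefs := sp.getD s []
  if t ≥ prefs.length then st
  else
    let c := prefs.getD t ""
    if full.contains c then (st.1 ++ [s], st.2)
    else (st.1, st.2.modify c [] (· ++ [s]))

def bostonSelect (cp : PySem.Dict String (List String))
    (st : PySem.Dict String String × PySem.Set String × List String) (item : String × List String) :
    PySem.Dict String String × PySem.Set String × List String :=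
  match (cp.getD item.1 []).find? (fun x => item.2.contains x) with
  | none => (st.1, st.2.1, st.2.2 ++ item.2)
  | some best =>
      (st.1.insert item.1 best, st.2.1.add item.1, st.2.2 ++ item.2.filter (fun a => a != best))

def bostonLoopM (sp cp : PySem.Dict String (List String)) :
    Nat → Nat → List String → PySem.Dict String String → PySem.Set String →
    PySem.Dict String String
  | 0, _, _, ms, _ => ms
  | n + 1, t, free, ms, full =>
    if free.isEmpty then ms
    else
      let g := free.foldl (bostonGroup sp full t) ([], PySem.Dict.empty)
      let a := g.2.items.foldl (bostonSelect cp) (ms, full, g.1)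
      bostonLoopM sp cp n (t + 1) a.2.2 a.1 a.2.1

-- names for the round's pieces (proof-only helpers)
def bostonChoice (sp : PySem.Dict String (List String)) (t : Nat) (s : String) : String :=
  (sp.getD s []).getD t ""

def bostonQ (sp : PySem.Dict String (List String)) (full : PySem.Set String) (t : Nat) (s : String) : Bool :=
  decide (t < (sp.getD s []).length) && full.contains (bostonChoice sp t s)

def bostonP (sp : PySem.Dict String (List String)) (full : PySem.Set String) (t : Nat) (s : String) : Bool :=
  decide (t < (sp.getD s []).length) && !full.contains (bostonChoice sp t s)

def bostonChunk (cp : PySem.Dict String (List String)) (it : String × List String) : List String :=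
  match (cp.getD it.1 []).find? (fun x => it.2.contains x) with
  | none => it.2
  | some best => it.2.filter (fun a => a != best)

def bostonMs (cp : PySem.Dict String (List String)) (m : PySem.Dict String String)
    (it : String × List String) : PySem.Dict String String :=
  match (cp.getD it.1 []).find? (fun x => it.2.contains x) with
  | none => m
  | some best => m.insert it.1 best

def bostonFull (cp : PySem.Dict String (List String)) (f : PySem.Set String)
    (it : String × List String) : PySem.Set String :=
  match (cp.getD it.1 []).find? (fun x => it.2.contains x) with
  | none => f
  | some _ => f.add it.1

def bostonBuckets (sp : PySem.Dict String (List String)) (full : PySem.Set String) (t : Nat)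
    (free : List String) : PySem.Dict String (List String) :=
  (free.filter (bostonP sp full t)).foldl
    (fun d s => d.modify (bostonChoice sp t s) [] (· ++ [s])) PySem.Dict.empty

-- A's "setdefault-by-hand then append" equals a plain modify
theorem boston_modify_setdefault (d : PySem.Dict String (List String)) (c : String)
    (f : List String → List String) :
    (if d.contains c then d else d.insert c []).modify c [] f = d.modify c [] f := by
  by_cases h : d.contains c
  · simp [h]
  · simp only [Bool.not_eq_true] at h
    have hg : d.getD c [] = [] := by
      unfold PySem.Dict.getD
      rw [(PySem.Dict.get?_eq_none_iff_contains d c).mpr h]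
      rfl
    simp only [h, Bool.false_eq_true, if_false, PySem.Dict.modify]
    rw [PySem.Dict.insert_insert_self, PySem.Dict.getD_insert_self, hg]

-- min over the valid applicants by c_pref.index = first element of c_pref that applied
theorem boston_min_index_eq_find (l apps : List String) :
    PySem.List.min? (apps.filter (fun a => l.contains a))
        (fun x => (PySem.List.index? l x).getD 0)
      = l.find? (fun x => apps.contains x) := by
  rcases hf : l.find? (fun x => apps.contains x) with _ | x0
  · have hnone := List.find?_eq_none.mp hf
    have hempty : apps.filter (fun a => l.contains a) = [] := by
      apply List.filter_eq_nil_iff.mpr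
      intro a ha hla
      have hal : a ∈ l := by simpa using hla
      exact hnone a hal (by simpa using ha)
    rw [hempty]
    exact (PySem.List.min?_eq_none_iff _ _).mpr rfl
  · obtain ⟨hx0b, as, bs, hl, has⟩ := List.find?_eq_some_iff_append.mp hf
    have hx0apps : x0 ∈ apps := by simpa using hx0b
    have hx0l : x0 ∈ l := by rw [hl]; simp
    have hx0valid : x0 ∈ apps.filter (fun a => l.contains a) := by
      rw [List.mem_filter]
      exact ⟨hx0apps, by simpa using hx0l⟩
    rcases hm : PySem.List.min? (apps.filter (fun a => l.contains a))
        (fun x => (PySem.List.index? l x).getD 0) with _ | m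
    · exfalso
      have := (PySem.List.min?_eq_none_iff _ _).mp hm
      rw [this] at hx0valid
      simp at hx0valid
    · have hmem := PySem.List.min?_mem hm
      have hmin := PySem.List.min?_isMin hm
      have hx0nas : x0 ∉ as := by
        intro hmemas
        have := has x0 hmemas
        simp only [Bool.not_eq_true'] at this
        rw [hx0b] at this
        simp at this
      have hkx0 : PySem.List.index? l x0 = some as.length :=
        (PySem.List.index?_eq_some_iff l x0 as.length).mpr ⟨as, bs, hl, rfl, hx0nas⟩
      have hmf := hmem
      rw [List.mem_filter] at hmf
      obtain ⟨hmapps, hmlb⟩ := hmf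
      have hml : m ∈ l := by simpa using hmlb
      obtain ⟨k, hk⟩ := Option.isSome_iff_exists.mp ((PySem.List.index?_isSome_iff l m).mpr hml)
      obtain ⟨hklen, hgot, _⟩ := PySem.List.getElem_of_index?_eq_some hk
      have hle : k ≤ as.length := by
        have := hmin x0 hx0valid
        rw [hk, hkx0] at this
        simpa using this
      have hge : ¬ k < as.length := by
        intro hlt
        have hgl : l[k]'hklen = as[k]'hlt := by
          have : l = as ++ x0 :: bs := hl
          subst this
          exact List.getElem_append_left hlt
        have hmas : m ∈ as := by
          rw [← hgot, hgl]
          exact List.getElem_mem hlt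
        have := has m hmas
        simp only [Bool.not_eq_true'] at this
        rw [show apps.contains m = true by simpa using hmapps] at this
        simp at this
      have hkeq : k = as.length := le_antisymm hle (not_lt.mp hge)
      have : m = x0 := by
        rw [← hgot]
        subst hkeq
        have : l = as ++ x0 :: bs := hl
        subst this
        simp
      rw [this]

-- A's acceptance step is M's selection step
theorem boston_accept_eq_select (cp : PySem.Dict String (List String)) :
    bostonAccept cp = bostonSelect cp := by
  funext st it
  simp only [bostonAccept, bostonSelect, boston_min_index_eq_find]

-- M's grouping step in branch-free form
theorem boston_group_step (sp : PySem.Dict String (List String)) (full : PySem.Set String)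
    (t : Nat) (st : List String × PySem.Dict String (List String)) (s : String) :
    bostonGroup sp full t st s =
      (if bostonQ sp full t s then st.1 ++ [s] else st.1,
       if bostonP sp full t s then st.2.modify (bostonChoice sp t s) [] (· ++ [s]) else st.2) := by
  unfold bostonGroup bostonQ bostonP bostonChoice
  by_cases h1 : (sp.getD s []).length ≤ t
  · simp [h1, Nat.not_lt.mpr h1]
  · have h1' : t < (sp.getD s []).length := Nat.not_le.mp h1
    by_cases h2 : (sp.getD s [])[t]'h1' ∈ full
    · simp [Nat.not_le.mpr h1', h1', h2]
    · simp [Nat.not_le.mpr h1', h1', h2]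

-- M's grouping fold splits into the carried-forward list and the buckets dict
theorem boston_group_fold (sp : PySem.Dict String (List String)) (full : PySem.Set String)
    (t : Nat) (free : List String) (a : List String) (b : PySem.Dict String (List String)) :
    free.foldl (bostonGroup sp full t) (a, b)
      = (a ++ free.filter (bostonQ sp full t),
         (free.filter (bostonP sp full t)).foldl
           (fun d s => d.modify (bostonChoice sp t s) [] (· ++ [s])) b) := by
  have h : free.foldl (bostonGroup sp full t) (a, b)
      = free.foldl (fun st s =>
          ((fun r s => if bostonQ sp full t s then r ++ [s] else r) st.1 s,
           (fun d s => if bostonP sp full t s then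
              PySem.Dict.modify d (bostonChoice sp t s) [] (· ++ [s]) else d) st.2 s)) (a, b) :=
    PySem.List.foldl_congr_mem _ _ _ _ (fun acc x _ => boston_group_step sp full t acc x)
  rw [h, PySem.List.foldl_prod_mk
        (f := fun r s => if bostonQ sp full t s then r ++ [s] else r)
        (g := fun d s => if bostonP sp full t s then
            PySem.Dict.modify d (bostonChoice sp t s) [] (· ++ [s]) else d),
      PySem.List.foldl_append_if_eq_filter, PySem.List.foldl_if_eq_foldl_filter]

theorem boston_buckets_keys (sp : PySem.Dict String (List String)) (full : PySem.Set String)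
    (t : Nat) (free : List String) :
    (bostonBuckets sp full t free).keys
      = PySem.Set.ofList ((free.filter (bostonP sp full t)).map (bostonChoice sp t)) := by
  unfold bostonBuckets
  rw [PySem.Dict.keys_foldl_modify_key (free.filter (bostonP sp full t)) (bostonChoice sp t) []
      (fun _ s => (· ++ [s])) PySem.Dict.empty]
  rw [PySem.Set.ofList_eq_foldl]
  rfl

theorem boston_buckets_nodup_keys (sp : PySem.Dict String (List String)) (full : PySem.Set String)
    (t : Nat) (free : List String) : (bostonBuckets sp full t free).keys.Nodup := by
  unfold bostonBuckets
  apply PySem.Dict.nodup_keys_foldl_modify_key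
  simp [PySem.Dict.empty, PySem.Dict.keys]

theorem boston_buckets_getD (sp : PySem.Dict String (List String)) (full : PySem.Set String)
    (t : Nat) (free : List String) (c : String) :
    (bostonBuckets sp full t free).getD c []
      = (free.filter (bostonP sp full t)).filter (fun s => bostonChoice sp t s == c) := by
  unfold bostonBuckets
  have hmap : (free.filter (bostonP sp full t)).foldl
      (fun d s => d.modify (bostonChoice sp t s) [] (· ++ [s])) PySem.Dict.empty
      = ((free.filter (bostonP sp full t)).map (fun s => (bostonChoice sp t s, s))).foldl
          (fun d p => d.modify p.1 [] (· ++ [p.2])) PySem.Dict.empty := by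
    rw [List.foldl_map]
  rw [hmap, PySem.Dict.getD_foldl_modify_append, List.filter_map, List.map_map]
  have hc : ((fun (x : String × String) => x.2) ∘ fun s => (bostonChoice sp t s, s))
      = fun s => s := rfl
  rw [hc, List.map_id_fun']
  rfl

theorem boston_buckets_items (sp : PySem.Dict String (List String)) (full : PySem.Set String)
    (t : Nat) (free : List String) :
    (bostonBuckets sp full t free).items
      = (PySem.Set.ofList ((free.filter (bostonP sp full t)).map (bostonChoice sp t))).map
          (fun c => (c, (free.filter (bostonP sp full t)).filter (fun s => bostonChoice sp t s == c))) := by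
  rw [PySem.Dict.items_eq_map_keys _ (boston_buckets_nodup_keys sp full t free) []]
  rw [boston_buckets_keys]
  apply List.map_congr_left
  intro c _
  rw [boston_buckets_getD]

-- pidx bookkeeping
theorem boston_getD_foldl_insert_of_not_mem (l : List String) (d : PySem.Dict String Nat)
    (v : Nat) (s : String) : s ∉ l →
    (l.foldl (fun d x => d.insert x v) d).getD s 0 = d.getD s 0 := by
  induction l generalizing d with
  | nil => intro _; rfl
  | cons x tl ih =>
    intro h
    rw [List.foldl_cons, ih _ (List.ne_and_not_mem_of_not_mem_cons h).2]
    exact PySem.Dict.getD_insert_of_ne d v 0 (List.ne_and_not_mem_of_not_mem_cons h).1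

theorem boston_getD_foldl_insert_of_mem (l : List String) (d : PySem.Dict String Nat)
    (v : Nat) (s : String) : s ∈ l →
    (l.foldl (fun d x => d.insert x v) d).getD s 0 = v := by
  induction l generalizing d with
  | nil => intro h; simp at h
  | cons x tl ih =>
    intro h
    rw [List.foldl_cons]
    by_cases htl : s ∈ tl
    · exact ih _ htl
    · have hx : s = x := (List.mem_cons.mp h).resolve_right htl
      rw [boston_getD_foldl_insert_of_not_mem tl _ v s htl, hx,
          PySem.Dict.getD_insert_self]

-- A's proposal fold is M's grouping fold plus the index-dict update
theorem boston_propose_eq (sp : PySem.Dict String (List String)) (full : PySem.Set String)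
    (t : Nat) :
    ∀ (free : List String) (rem : List String) (props : PySem.Dict String (List String))
      (pidx : PySem.Dict String Nat),
      free.Nodup → (∀ s ∈ free, pidx.getD s 0 = t) →
      free.foldl (bostonPropose sp full) (rem, props, pidx)
        = ((free.foldl (bostonGroup sp full t) (rem, props)).1,
           (free.foldl (bostonGroup sp full t) (rem, props)).2,
           (free.filter (fun s => decide (t < (sp.getD s []).length))).foldl
             (fun d s => d.insert s (t + 1)) pidx) := by
  intro free
  induction free with
  | nil => intro rem props pidx _ _; rfl
  | cons s tl ih =>
    intro rem props pidx hnd hp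
    have hps : pidx.getD s 0 = t := hp s List.mem_cons_self
    have hnds : s ∉ tl := (List.nodup_cons.mp hnd).1
    have hndtl : tl.Nodup := (List.nodup_cons.mp hnd).2
    rw [List.foldl_cons, List.foldl_cons, List.filter_cons]
    by_cases h1 : (sp.getD s []).length ≤ t
    · have hstep : bostonPropose sp full (rem, props, pidx) s = (rem, props, pidx) := by
        unfold bostonPropose
        simp [hps, h1]
      have hstepB : bostonGroup sp full t (rem, props) s = (rem, props) := by
        unfold bostonGroup
        simp [h1]
      rw [hstep, hstepB]
      simp only [Nat.not_lt.mpr h1, decide_false, Bool.false_eq_true, if_false]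
      exact ih rem props pidx hndtl (fun x hx => hp x (List.mem_cons_of_mem _ hx))
    · have h1' : t < (sp.getD s []).length := Nat.not_le.mp h1
      have hptl : ∀ x ∈ tl, (pidx.insert s (t + 1)).getD x 0 = t := by
        intro x hx
        rw [PySem.Dict.getD_insert_of_ne _ _ _ (fun he => hnds (by rw [← he]; exact hx))]
        exact hp x (List.mem_cons_of_mem _ hx)
      by_cases h2 : (sp.getD s [])[t]'h1' ∈ full
      · have hstep : bostonPropose sp full (rem, props, pidx) s
            = (rem ++ [s], props, pidx.insert s (t + 1)) := by
          unfold bostonPropose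
          simp [hps, Nat.not_le.mpr h1', h1', h2]
        have hstepB : bostonGroup sp full t (rem, props) s = (rem ++ [s], props) := by
          unfold bostonGroup
          simp [Nat.not_le.mpr h1', h1', h2]
        rw [hstep, hstepB]
        simp only [h1', decide_true, if_true]
        exact ih (rem ++ [s]) props (pidx.insert s (t + 1)) hndtl hptl
      · have hstep : bostonPropose sp full (rem, props, pidx) s
            = (rem, props.modify ((sp.getD s []).getD t "") [] (· ++ [s]),
               pidx.insert s (t + 1)) := by
          unfold bostonPropose
          simp [hps, Nat.not_le.mpr h1', h1', h2, boston_modify_setdefault]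
        have hstepB : bostonGroup sp full t (rem, props) s
            = (rem, props.modify ((sp.getD s []).getD t "") [] (· ++ [s])) := by
          unfold bostonGroup
          simp [Nat.not_le.mpr h1', h1', h2]
        rw [hstep, hstepB]
        simp only [h1', decide_true, if_true]
        exact ih rem (props.modify ((sp.getD s []).getD t "") [] (· ++ [s]))
          (pidx.insert s (t + 1)) hndtl hptl

theorem boston_loopM_nil (sp cp : PySem.Dict String (List String)) (n t : Nat)
    (ms : PySem.Dict String String) (full : PySem.Set String) :
    bostonLoopM sp cp n t [] ms full = ms := by
  cases n <;> simp [bostonLoopM]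

theorem boston_chunk_sublist (cp : PySem.Dict String (List String)) (it : String × List String) :
    (bostonChunk cp it).Sublist it.2 := by
  unfold bostonChunk
  rcases (cp.getD it.1 []).find? (fun x => it.2.contains x) with _ | best
  · exact List.Sublist.refl _
  · exact List.filter_sublist

theorem boston_select_step (cp : PySem.Dict String (List String))
    (st : PySem.Dict String String × PySem.Set String × List String) (it : String × List String) :
    bostonSelect cp st it
      = (bostonMs cp st.1 it, bostonFull cp st.2.1 it, st.2.2 ++ bostonChunk cp it) := by
  unfold bostonSelect bostonMs bostonFull bostonChunk
  rcases h : (cp.getD it.1 []).find? (fun x => it.2.contains x) with _ | best <;> rfl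

theorem boston_select_fold (cp : PySem.Dict String (List String)) (items : List (String × List String))
    (m : PySem.Dict String String) (f : PySem.Set String) (r : List String) :
    items.foldl (bostonSelect cp) (m, f, r)
      = (items.foldl (bostonMs cp) m, items.foldl (bostonFull cp) f,
         r ++ items.flatMap (bostonChunk cp)) := by
  have h : items.foldl (bostonSelect cp) (m, f, r)
      = items.foldl (fun st it =>
          (bostonMs cp st.1 it,
           (fun (p : PySem.Set String × List String) it =>
              (bostonFull cp p.1 it, p.2 ++ bostonChunk cp it)) st.2 it)) (m, f, r) :=
    PySem.List.foldl_congr_mem _ _ _ _ (fun acc x _ => boston_select_step cp acc x)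
  rw [h, PySem.List.foldl_prod_mk
        (f := bostonMs cp)
        (g := fun (p : PySem.Set String × List String) it =>
          (bostonFull cp p.1 it, p.2 ++ bostonChunk cp it))]
  rw [PySem.List.foldl_prod_mk (f := bostonFull cp) (g := fun r it => r ++ bostonChunk cp it)]
  rw [PySem.List.foldl_append_eq_flatMap]

-- every seeker still free after a round came from the round's free list and had not exhausted its list
theorem boston_mem_round (sp cp : PySem.Dict String (List String)) (full : PySem.Set String)
    (t : Nat) (free : List String) (x : String)
    (hx : x ∈ free.filter (bostonQ sp full t)
            ++ (bostonBuckets sp full t free).items.flatMap (bostonChunk cp)) :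
    x ∈ free ∧ t < (sp.getD x []).length := by
  rcases List.mem_append.mp hx with h | h
  · rw [List.mem_filter] at h
    refine ⟨h.1, ?_⟩
    have := h.2
    unfold bostonQ at this
    simpa using (Bool.and_eq_true_iff.mp this).1
  · obtain ⟨it, hit, hxit⟩ := List.mem_flatMap.mp h
    have hx2 : x ∈ it.2 := (boston_chunk_sublist cp it).mem hxit
    rw [boston_buckets_items] at hit
    obtain ⟨c, _, hc⟩ := List.mem_map.mp hit
    rw [← hc] at hx2
    simp only at hx2
    rw [List.mem_filter] at hx2
    have hx3 := hx2.1
    rw [List.mem_filter] at hx3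
    refine ⟨hx3.1, ?_⟩
    have := hx3.2
    unfold bostonP at this
    simpa using (Bool.and_eq_true_iff.mp this).1

-- the still-free list after a round has no duplicates
theorem boston_nodup_round (sp cp : PySem.Dict String (List String)) (full : PySem.Set String)
    (t : Nat) (free : List String) (hnd : free.Nodup) :
    (free.filter (bostonQ sp full t)
      ++ (bostonBuckets sp full t free).items.flatMap (bostonChunk cp)).Nodup := by
  have hlf : (free.filter (bostonP sp full t)).Nodup := hnd.filter _
  have hmemb : ∀ c x, x ∈ bostonChunk cp
      (c, (free.filter (bostonP sp full t)).filter (fun s => bostonChoice sp t s == c)) →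
      x ∈ free.filter (bostonP sp full t) ∧ bostonChoice sp t x = c := by
    intro c x hx
    have hx2 := (boston_chunk_sublist cp _).mem hx
    simp only at hx2
    rw [List.mem_filter] at hx2
    exact ⟨hx2.1, by simpa using hx2.2⟩
  rw [boston_buckets_items]
  apply List.Nodup.append
  · exact hnd.filter _
  · rw [List.flatMap_map, List.nodup_flatMap]
    constructor
    · intro c _
      exact ((hlf.filter _).sublist (boston_chunk_sublist cp _))
    · have hS : (PySem.Set.ofList ((free.filter (bostonP sp full t)).map (bostonChoice sp t))).Nodup :=
        PySem.Set.nodup_ofList _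
      refine hS.imp ?_
      intro a b hab x hxa hxb
      exact hab (((hmemb a x hxa).2).symm.trans ((hmemb b x hxb).2))
  · intro x hx1 hx2
    rw [List.mem_filter] at hx1
    have hQ := hx1.2
    rw [List.flatMap_map] at hx2
    obtain ⟨c, _, hc⟩ := List.mem_flatMap.mp hx2
    have := (hmemb c x hc).1
    rw [List.mem_filter] at this
    have hP := this.2
    unfold bostonQ at hQ
    unfold bostonP at hP
    have h1 := (Bool.and_eq_true_iff.mp hQ).2
    have h2 := (Bool.and_eq_true_iff.mp hP).2
    rw [h1] at h2
    simp at h2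

-- one round of A (proposal fold + acceptance fold) equals one level of M, and the loops stay in lockstep
theorem boston_loop_eq (sp cp : PySem.Dict String (List String)) (n : Nat) :
    ∀ (t : Nat) (free : List String) (pidx : PySem.Dict String Nat)
      (ms : PySem.Dict String String) (full : PySem.Set String),
      free.Nodup →
      (∀ s ∈ free, pidx.getD s 0 = t) →
      (∀ s ∈ free, t ≤ (sp.getD s []).length) →
      (∀ s ∈ free, (sp.getD s []).length ≤ t + n) →
      bostonLoopA sp cp (n + 1) free pidx ms full = bostonLoopM sp cp n t free ms full := by
  induction n with
  | zero =>
    intro t free pidx ms full hnd hp h3 h4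
    by_cases hfree : free = []
    · subst hfree; rfl
    · have hEmp : free.isEmpty = false := by simp [hfree]
      have hnl : ∀ s ∈ free, ¬ t < (sp.getD s []).length := by
        intro s hs
        have := h4 s hs
        omega
      have hQ : free.filter (bostonQ sp full t) = [] := by
        apply List.filter_eq_nil_iff.mpr
        intro s hs
        unfold bostonQ
        simp [hnl s hs]
      have hP : free.filter (bostonP sp full t) = [] := by
        apply List.filter_eq_nil_iff.mpr
        intro s hs
        unfold bostonP
        simp [hnl s hs]
      have hT : free.filter (fun s => decide (t < (sp.getD s []).length)) = [] := by
        apply List.filter_eq_nil_iff.mpr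
        intro s hs
        simp [hnl s hs]
      simp only [bostonLoopA, bostonLoopM, hEmp, Bool.false_eq_true, if_false]
      rw [boston_propose_eq sp full t free [] PySem.Dict.empty pidx hnd hp,
          boston_group_fold, hQ, hP, hT]
      simp [PySem.Dict.empty]
  | succ n ih =>
    intro t free pidx ms full hnd hp h3 h4
    by_cases hfree : free = []
    · subst hfree; rfl
    · have hEmp : free.isEmpty = false := by simp [hfree]
      have hprop := boston_propose_eq sp full t free [] PySem.Dict.empty pidx hnd hp
      have hA : bostonLoopA sp cp (n + 1 + 1) free pidx ms full
          = (if free.isEmpty then ms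
             else
               let p := free.foldl (bostonPropose sp full) ([], PySem.Dict.empty, pidx);
               let a := p.2.1.items.foldl (bostonAccept cp) (ms, full, p.1);
               if p.2.1.items.isEmpty && a.2.2.isEmpty then a.1
               else bostonLoopA sp cp (n + 1) a.2.2 p.2.2 a.1 a.2.1) := rfl
      have hB : bostonLoopM sp cp (n + 1) t free ms full
          = (if free.isEmpty then ms
             else
               let g := free.foldl (bostonGroup sp full t) ([], PySem.Dict.empty);
               let a := g.2.items.foldl (bostonSelect cp) (ms, full, g.1);
               bostonLoopM sp cp n (t + 1) a.2.2 a.1 a.2.1) := rfl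
      rw [hA, hB]
      simp only [hEmp, Bool.false_eq_true, if_false]
      rw [hprop, boston_accept_eq_select cp]
      dsimp only
      rw [boston_group_fold]
      dsimp only
      rw [show (free.filter (bostonP sp full t)).foldl
            (fun d s => d.modify (bostonChoice sp t s) [] (· ++ [s])) PySem.Dict.empty
            = bostonBuckets sp full t free from rfl]
      rw [boston_select_fold]
      dsimp only
      simp only [List.nil_append]
      have hmemf : ∀ x ∈ free.filter (bostonQ sp full t)
            ++ (bostonBuckets sp full t free).items.flatMap (bostonChunk cp),
          x ∈ free ∧ t < (sp.getD x []).length :=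
        fun x hx => boston_mem_round sp cp full t free x hx
      have hnd' : (free.filter (bostonQ sp full t)
            ++ (bostonBuckets sp full t free).items.flatMap (bostonChunk cp)).Nodup :=
        boston_nodup_round sp cp full t free hnd
      by_cases hbr : ((bostonBuckets sp full t free).items.isEmpty
          && (free.filter (bostonQ sp full t)
              ++ (bostonBuckets sp full t free).items.flatMap (bostonChunk cp)).isEmpty) = true
      · rw [if_pos hbr, List.isEmpty_iff.mp (Bool.and_eq_true_iff.mp hbr).2, boston_loopM_nil]
      · rw [if_neg hbr]
        apply ih (t + 1) _ _ _ _ hnd'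
        · intro x hx
          apply boston_getD_foldl_insert_of_mem
          exact List.mem_filter.mpr ⟨(hmemf x hx).1, by simp [(hmemf x hx).2]⟩
        · intro x hx
          exact (hmemf x hx).2
        · intro x hx
          have := h4 x (hmemf x hx).1
          omega

-- ===== M = B bridge =====

-- the seeker s's remaining preference suffix after level t, and its (name, suffix) pair
def bostonSusp (sp : PySem.Dict String (List String)) (t : Nat) (s : String) : List String :=
  (sp.getD s []).drop (t + 1)

def bostonPair (sp : PySem.Dict String (List String)) (t : Nat) (s : String) :
    String × List String := (s, bostonSusp sp t s)

-- the flat proposal list a level-t pass 1 produces, and one company's grouped applicants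
def bostonProps (sp : PySem.Dict String (List String)) (full : PySem.Set String) (t : Nat)
    (free : List String) : List (String × String × List String) :=
  (free.filter (bostonP sp full t)).map (fun s => (bostonChoice sp t s, s, bostonSusp sp t s))

def bostonGrouped (sp : PySem.Dict String (List String)) (full : PySem.Set String) (t : Nat)
    (free : List String) (c : String) : List String :=
  (free.filter (bostonP sp full t)).filter (fun s => bostonChoice sp t s == c)

-- B's process of one first-seen company (phase-2 else branch, seekers as name-suffix pairs)
def bostonProcess (cp : PySem.Dict String (List String))
    (proposals : List (String × String × List String))
    (st : PySem.Dict String String × List (String × List String)) (c : String) :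
    PySem.Dict String String × List (String × List String) :=
  match (cp.getD c []).find? (fun x =>
      ((proposals.filter (fun r => r.1 == c)).map (fun r => (r.2.1, r.2.2))).any
        (fun a => a.1 == x)) with
  | none => (st.1, st.2 ++ (proposals.filter (fun r => r.1 == c)).map (fun r => (r.2.1, r.2.2)))
  | some w => (st.1.insert c w,
      st.2 ++ ((proposals.filter (fun r => r.1 == c)).map (fun r => (r.2.1, r.2.2))).filter
        (fun a => a.1 != w))

-- M's select of one bucket, the bucket computed from the company name
def bostonMStep (sp cp : PySem.Dict String (List String)) (full : PySem.Set String) (t : Nat)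
    (free : List String)
    (st : PySem.Dict String String × PySem.Set String × List String) (c : String) :
    PySem.Dict String String × PySem.Set String × List String :=
  bostonSelect cp st (c, bostonGrouped sp full t free c)

theorem boston_contains_add (s : PySem.Set String) (x y : String) :
    (PySem.Set.add s x).contains y = (y == x || PySem.Set.contains s y) := by
  by_cases hx : x ∈ s
  · have h : PySem.Set.add s x = s := by simp [PySem.Set.add, hx]
    rw [h]
    by_cases hxy : y = x
    · subst hxy; simp [hx]
    · simp [hxy]
  · have h : PySem.Set.add s x = s ++ [x] := by simp [PySem.Set.add, hx]
    rw [h]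
    by_cases hxy : y = x
    · subst hxy; simp
    · simp [hxy]

theorem boston_phase2_step (cp : PySem.Dict String (List String))
    (proposals : List (String × String × List String))
    (st : PySem.Set String × PySem.Dict String String × List (String × List String))
    (q : String × String × List String) :
    bostonPhase2 cp proposals st q
      = if st.1.contains q.1 then st
        else (st.1.add q.1, bostonProcess cp proposals st.2 q.1) := by
  unfold bostonPhase2 bostonProcess
  by_cases h : st.1.contains q.1
  · simp only [h, if_true]
  · simp only [h, Bool.false_eq_true, if_false]
    rcases hf : (cp.getD q.1 []).find? (fun x =>
        ((proposals.filter (fun r => r.1 == q.1)).map (fun r => (r.2.1, r.2.2))).any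
          (fun a => a.1 == x)) with _ | w <;> simp only [hf]

-- first occurrences of a key list not already seen (B's seen-set skip, as a list)
def bostonNewKeys : List String → PySem.Set String → List String
  | [], _ => []
  | x :: r, seen =>
      if seen.contains x then bostonNewKeys r seen else x :: bostonNewKeys r (seen.add x)

theorem boston_foldl_add_eq_append_newKeys :
    ∀ (xs : List String) (seen : PySem.Set String),
      xs.foldl PySem.Set.add seen = seen ++ bostonNewKeys xs seen := by
  intro xs
  induction xs with
  | nil => intro seen; simp [bostonNewKeys]
  | cons x r ih =>
    intro seen
    rw [List.foldl_cons]
    unfold bostonNewKeys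
    by_cases h : seen.contains x
    · have hx : x ∈ seen := by simpa using h
      rw [show PySem.Set.add seen x = seen by simp [PySem.Set.add, hx], ih seen, if_pos h]
    · have hx : x ∉ seen := by simpa using h
      rw [ih (PySem.Set.add seen x), if_neg h]
      rw [show PySem.Set.add seen x = seen ++ [x] by simp [PySem.Set.add, hx]]
      simp

theorem boston_newKeys_empty (xs : List String) :
    bostonNewKeys xs PySem.Set.empty = PySem.Set.ofList xs := by
  rw [PySem.Set.ofList_eq_foldl, boston_foldl_add_eq_append_newKeys]
  rfl

-- the seen-set fold computes the plain fold over the first-occurrence keys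
theorem boston_seen_fold {sigma : Type} (g : sigma → String → sigma) :
    ∀ (l : List (String × String × List String)) (seen : PySem.Set String) (acc : sigma),
      (l.foldl (fun st q => if st.1.contains q.1 then st else (st.1.add q.1, g st.2 q.1))
          ((seen, acc) : PySem.Set String × sigma)).2
        = (bostonNewKeys (l.map (fun q => q.1)) seen).foldl g acc := by
  intro l
  induction l with
  | nil => intro seen acc; rfl
  | cons q r ih =>
    intro seen acc
    rw [List.foldl_cons, List.map_cons]
    simp only [bostonNewKeys]
    by_cases h : seen.contains q.1
    · simp only [h, if_true]
      exact ih seen acc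
    · simp only [h, Bool.false_eq_true, if_false]
      rw [List.foldl_cons]
      exact ih (seen.add q.1) (g acc q.1)

-- pass 1 of B over the pool = M's carry filter plus the flat proposal list
theorem boston_phase1_step (sp : PySem.Dict String (List String))
    (ms : PySem.Dict String String) (full : PySem.Set String) (t : Nat)
    (hfull : ∀ c, full.contains c = ms.contains c)
    (st : List (String × List String) × List (String × String × List String)) (s : String) :
    bostonPhase1 ms st (s, (sp.getD s []).drop t)
      = (if bostonQ sp full t s then st.1 ++ [bostonPair sp t s] else st.1,
         if bostonP sp full t s then st.2 ++ [(bostonChoice sp t s, s, bostonSusp sp t s)] else st.2) := by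
  by_cases h1 : (sp.getD s []).length ≤ t
  · rw [List.drop_eq_nil_of_le h1]
    unfold bostonPhase1 bostonQ bostonP
    simp [Nat.not_lt.mpr h1]
  · have h1' : t < (sp.getD s []).length := Nat.not_le.mp h1
    rw [List.drop_eq_getElem_cons h1']
    unfold bostonPhase1 bostonQ bostonP bostonChoice bostonPair bostonSusp
    simp only [hfull]
    rw [List.getD_eq_getElem _ _ h1']
    by_cases h2 : ms.contains ((sp.getD s [])[t]'h1')
    · simp [h1', h2]
    · simp [h1', h2]

theorem boston_phase1_fold (sp : PySem.Dict String (List String))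
    (ms : PySem.Dict String String) (full : PySem.Set String) (t : Nat)
    (hfull : ∀ c, full.contains c = ms.contains c) (free : List String) :
    (free.map (fun s => (s, (sp.getD s []).drop t))).foldl (bostonPhase1 ms) ([], [])
      = ((free.filter (bostonQ sp full t)).map (bostonPair sp t),
         bostonProps sp full t free) := by
  rw [List.foldl_map]
  have h : free.foldl (fun st s => bostonPhase1 ms st (s, (sp.getD s []).drop t)) ([], [])
      = free.foldl (fun st s =>
          ((fun r s => if bostonQ sp full t s then r ++ [bostonPair sp t s] else r) st.1 s,
           (fun r s => if bostonP sp full t s then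
              r ++ [(bostonChoice sp t s, s, bostonSusp sp t s)] else r) st.2 s)) ([], []) :=
    PySem.List.foldl_congr_mem _ _ _ _
      (fun acc x _ => boston_phase1_step sp ms full t hfull acc x)
  rw [h, PySem.List.foldl_prod_mk
        (f := fun r s => if bostonQ sp full t s then r ++ [bostonPair sp t s] else r)
        (g := fun r s => if bostonP sp full t s then
            r ++ [(bostonChoice sp t s, s, bostonSusp sp t s)] else r),
      PySem.List.foldl_append_if (bostonQ sp full t) (bostonPair sp t) free [],
      PySem.List.foldl_append_if (bostonP sp full t)
        (fun s => (bostonChoice sp t s, s, bostonSusp sp t s)) free []]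
  rfl

-- pass 2: B's first-seen-company process tracks M's select fold
theorem boston_phase2_rel (sp cp : PySem.Dict String (List String)) (full0 : PySem.Set String)
    (t : Nat) (free : List String) :
    ∀ (C : List String) (msM : PySem.Dict String String) (fullM : PySem.Set String)
      (frM : List String),
      (∀ c, fullM.contains c = msM.contains c) →
      (C.foldl (bostonProcess cp (bostonProps sp full0 t free))
          (msM, frM.map (bostonPair sp t))).1
        = (C.foldl (bostonMStep sp cp full0 t free) (msM, fullM, frM)).1
      ∧ (∀ c, (C.foldl (bostonMStep sp cp full0 t free) (msM, fullM, frM)).2.1.contains c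
            = ((C.foldl (bostonProcess cp (bostonProps sp full0 t free))
                (msM, frM.map (bostonPair sp t))).1 : PySem.Dict String String).contains c)
      ∧ (C.foldl (bostonProcess cp (bostonProps sp full0 t free))
          (msM, frM.map (bostonPair sp t))).2
        = ((C.foldl (bostonMStep sp cp full0 t free) (msM, fullM, frM)).2.2).map
            (bostonPair sp t) := by
  intro C
  induction C with
  | nil =>
    intro msM fullM frM hfull
    exact ⟨rfl, fun c => hfull c, rfl⟩
  | cons c R ih =>
    intro msM fullM frM hfull
    rw [List.foldl_cons, List.foldl_cons]
    have happs : ((bostonProps sp full0 t free).filter (fun r => r.1 == c)).map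
        (fun r => (r.2.1, r.2.2))
        = (bostonGrouped sp full0 t free c).map (bostonPair sp t) := by
      unfold bostonProps bostonGrouped
      rw [List.filter_map, List.map_map]
      rfl
    have hpred : (fun x => (((bostonProps sp full0 t free).filter (fun r => r.1 == c)).map
        (fun r => (r.2.1, r.2.2))).any (fun a => a.1 == x))
        = (fun x => (bostonGrouped sp full0 t free c).contains x) := by
      funext x
      rw [happs, List.any_map]
      exact List.any_beq'
    have hproc : bostonProcess cp (bostonProps sp full0 t free) (msM, frM.map (bostonPair sp t)) c
        = match (cp.getD c []).find? (fun x => (bostonGrouped sp full0 t free c).contains x) with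
          | none => (msM, (frM ++ bostonGrouped sp full0 t free c).map (bostonPair sp t))
          | some w => (msM.insert c w,
              (frM ++ (bostonGrouped sp full0 t free c).filter (fun a => a != w)).map
                (bostonPair sp t)) := by
      unfold bostonProcess
      rw [hpred, happs]
      rcases (cp.getD c []).find? (fun x => (bostonGrouped sp full0 t free c).contains x)
        with _ | w
      · simp
      · have hcomp : ((fun a : String × List String => a.1 != w) ∘ bostonPair sp t)
            = (fun a : String => a != w) := by
          funext a
          simp [Function.comp, bostonPair]
        simp [List.filter_map, hcomp]
    have hsel : bostonMStep sp cp full0 t free (msM, fullM, frM) c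
        = match (cp.getD c []).find? (fun x => (bostonGrouped sp full0 t free c).contains x) with
          | none => (msM, fullM, frM ++ bostonGrouped sp full0 t free c)
          | some w => (msM.insert c w, fullM.add c,
              frM ++ (bostonGrouped sp full0 t free c).filter (fun a => a != w)) := by
      unfold bostonMStep bostonSelect
      rcases (cp.getD c []).find? (fun x => (bostonGrouped sp full0 t free c).contains x)
        with _ | w <;> rfl
    rw [hproc, hsel]
    rcases (cp.getD c []).find? (fun x => (bostonGrouped sp full0 t free c).contains x)
      with _ | w
    · exact ih msM fullM (frM ++ bostonGrouped sp full0 t free c) hfull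
    · apply ih (msM.insert c w) (fullM.add c)
        (frM ++ (bostonGrouped sp full0 t free c).filter (fun a => a != w))
      intro c'
      rw [boston_contains_add, PySem.Dict.contains_insert, hfull c']

-- M's rank-level loop equals B's pool loop
theorem boston_loopM_eq_loopB (sp cp : PySem.Dict String (List String)) :
    ∀ (n t : Nat) (free : List String) (ms : PySem.Dict String String) (full : PySem.Set String),
      (∀ c, full.contains c = ms.contains c) →
      bostonLoopM sp cp n t free ms full
        = bostonLoopB cp n (free.map (fun s => (s, (sp.getD s []).drop t))) ms := by
  intro n
  induction n with
  | zero => intro t free ms full _; rfl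
  | succ n ih =>
    intro t free ms full hfull
    by_cases hfree : free = []
    · subst hfree; rfl
    · have hEmpM : free.isEmpty = false := by simp [hfree]
      have hEmpB : (free.map (fun s => (s, (sp.getD s []).drop t))).isEmpty = false := by
        simp [hfree]
      have hM : bostonLoopM sp cp (n + 1) t free ms full
          = (if free.isEmpty then ms
             else
               let g := free.foldl (bostonGroup sp full t) ([], PySem.Dict.empty)
               let a := g.2.items.foldl (bostonSelect cp) (ms, full, g.1)
               bostonLoopM sp cp n (t + 1) a.2.2 a.1 a.2.1) := rfl
      have hB : bostonLoopB cp (n + 1) (free.map (fun s => (s, (sp.getD s []).drop t))) ms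
          = (if (free.map (fun s => (s, (sp.getD s []).drop t))).isEmpty then ms
             else
               let p := (free.map (fun s => (s, (sp.getD s []).drop t))).foldl
                 (bostonPhase1 ms) ([], [])
               let r := p.2.foldl (bostonPhase2 cp p.2) (PySem.Set.empty, ms, p.1)
               bostonLoopB cp n r.2.2 r.2.1) := rfl
      rw [hM, hB]
      simp only [hEmpM, hEmpB, Bool.false_eq_true, if_false]
      rw [boston_group_fold]
      dsimp only
      rw [show (free.filter (bostonP sp full t)).foldl
            (fun d s => d.modify (bostonChoice sp t s) [] (· ++ [s])) PySem.Dict.empty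
            = bostonBuckets sp full t free from rfl]
      rw [boston_select_fold, boston_phase1_fold sp ms full t hfull]
      dsimp only
      simp only [List.nil_append]
      -- rewrite B's pass-2 fold into the seen-set normal form and then first-occurrence form
      have hstep : (bostonProps sp full t free).foldl
            (bostonPhase2 cp (bostonProps sp full t free))
            (PySem.Set.empty, ms, (free.filter (bostonQ sp full t)).map (bostonPair sp t))
          = (bostonProps sp full t free).foldl
            (fun st q => if st.1.contains q.1 then st
              else (st.1.add q.1, bostonProcess cp (bostonProps sp full t free) st.2 q.1))
            (PySem.Set.empty, ms, (free.filter (bostonQ sp full t)).map (bostonPair sp t)) :=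
        PySem.List.foldl_congr_mem _ _ _ _
          (fun acc x _ => boston_phase2_step cp (bostonProps sp full t free) acc x)
      rw [hstep]
      have hkeys : (bostonProps sp full t free).map (fun q => q.1)
          = (free.filter (bostonP sp full t)).map (bostonChoice sp t) := by
        unfold bostonProps
        rw [List.map_map]
        rfl
      have hseen := boston_seen_fold
        (g := bostonProcess cp (bostonProps sp full t free))
        (bostonProps sp full t free) PySem.Set.empty
        (ms, (free.filter (bostonQ sp full t)).map (bostonPair sp t))
      rw [hkeys, boston_newKeys_empty] at hseen
      -- the M-side acceptance fold over the buckets items, as a fold over the company list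
      have hMfold : (bostonBuckets sp full t free).items.foldl (bostonSelect cp)
            (ms, full, free.filter (bostonQ sp full t))
          = (PySem.Set.ofList ((free.filter (bostonP sp full t)).map (bostonChoice sp t))).foldl
              (bostonMStep sp cp full t free) (ms, full, free.filter (bostonQ sp full t)) := by
        rw [boston_buckets_items, List.foldl_map]
        rfl
      have hrel := boston_phase2_rel sp cp full t free
        (PySem.Set.ofList ((free.filter (bostonP sp full t)).map (bostonChoice sp t)))
        ms full (free.filter (bostonQ sp full t)) hfull
      have hsel := hMfold
      rw [boston_select_fold] at hsel
      have hMs := congrArg Prod.fst hsel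
      have hFull := congrArg (fun x : PySem.Dict String String × PySem.Set String × List String
        => x.2.1) hsel
      have hFree := congrArg (fun x : PySem.Dict String String × PySem.Set String × List String
        => x.2.2) hsel
      dsimp only at hMs hFull hFree
      rw [hMs, hFull, hFree, hseen]
      rw [hrel.1, hrel.2.2]
      have hih := ih (t + 1)
        ((PySem.Set.ofList ((free.filter (bostonP sp full t)).map (bostonChoice sp t))).foldl
          (bostonMStep sp cp full t free) (ms, full, free.filter (bostonQ sp full t))).2.2
        ((PySem.Set.ofList ((free.filter (bostonP sp full t)).map (bostonChoice sp t))).foldl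
          (bostonMStep sp cp full t free) (ms, full, free.filter (bostonQ sp full t))).1
        ((PySem.Set.ofList ((free.filter (bostonP sp full t)).map (bostonChoice sp t))).foldl
          (bostonMStep sp cp full t free) (ms, full, free.filter (bostonQ sp full t))).2.1
        (fun c => by rw [hrel.2.1 c, hrel.1])
      rw [hih]
      rfl

-- ===== VERDICT (by name: the statement is the Claim_ definition above) =====
theorem run_boston_algorithm_spec : Claim_equal_run_boston_algorithm := by
  intro seekers_prefs companies_prefs _
  unfold Spec_run_boston_algorithm run_boston_algorithm run_boston_algorithm_alt
  dsimp only
  congr 1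
  have hnd : (PySem.Dict.ofList seekers_prefs).keys.Nodup := PySem.Dict.nodup_keys_ofList _
  rw [boston_loop_eq (PySem.Dict.ofList seekers_prefs) (PySem.Dict.ofList companies_prefs)
      _ 0 _ _ _ _ hnd
      (fun s hs => boston_getD_foldl_insert_of_mem _ _ 0 s hs)
      (fun s _ => Nat.zero_le _)
      (fun s hs => by
        have hv : (PySem.Dict.ofList seekers_prefs).getD s []
            ∈ (PySem.Dict.ofList seekers_prefs).values := by
          rw [PySem.Dict.values_eq_map_keys _ hnd []]
          exact List.mem_map.mpr ⟨s, hs, rfl⟩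
        have := (PySem.List.le_foldl_max_nat (PySem.Dict.ofList seekers_prefs).values
          List.length 0).2 _ hv
        omega)]
  rw [boston_loopM_eq_loopB (PySem.Dict.ofList seekers_prefs) (PySem.Dict.ofList companies_prefs)
      _ 0 _ _ _ (fun c => by simp [PySem.Set.empty, PySem.Dict.contains_empty])]
  have hpool : (PySem.Dict.ofList seekers_prefs).keys.map
        (fun s => (s, ((PySem.Dict.ofList seekers_prefs).getD s []).drop 0))
      = (PySem.Dict.ofList seekers_prefs).items := by
    rw [PySem.Dict.items_eq_map_keys _ hnd []]
    simp
  have hfuel : (PySem.Dict.ofList seekers_prefs).values.foldl (fun m l => max m l.length) 0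
      = (PySem.Dict.ofList seekers_prefs).items.foldl (fun m q => max m q.2.length) 0 := by
    rw [show (PySem.Dict.ofList seekers_prefs).values
        = (PySem.Dict.ofList seekers_prefs).items.map (fun p => p.2) from rfl, List.foldl_map]
  rw [hpool, hfuel]
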